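-- pv_equiv track=rewrite | github.com/killriam/ProxyPrintingScriptCardSize | download_card_images.py | strip_image_suffix
-- ===== SOURCE A (Python) =====
-- def strip_image_suffix(raw_name: str) -> str:
--     """
--     Convert the image filename stored in XML to a Scryfall card name.
--     E.g. "Lightning Bolt_normal.jpg"  -> "Lightning Bolt"
--          "Arid Mesa_large.jpg"        -> "Arid Mesa"
--     """
--     name = raw_name
--     for suffix in ("_normal.jpg", "_normal.png", "_large.jpg", "_large.png",
--                    "_small.jpg", "_small.png", ".jpg", ".png"):
--         if name.lower().endswith(suffix.lower()):
--             name = name[: -len(suffix)]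
--             break
--     return name.strip()
-- ===== SOURCE B (Python) =====
-- def strip_image_suffix(raw_name: str) -> str:
--     """
--     Convert the image filename stored in XML to a Scryfall card name.
--     Peels the extension first, then an optional size tag, instead of
--     scanning a table of eight combined suffixes.
--     """
--     low = raw_name.lower()
--     if low.endswith(".jpg") or low.endswith(".png"):
--         name = raw_name[:-4]
--         lowb = low[:-4]
--         if lowb.endswith("_normal"):
--             name = name[:-7]
--         elif lowb.endswith("_large"):
--             name = name[:-6]
--         elif lowb.endswith("_small"):
--             name = name[:-6]
--     else:
--         name = raw_name
--     return name.strip()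
-- ===== Notes on version B (the rewrite author's own statement) =====
-- stated objective: simpler
-- what changed: Instead of scanning a table of eight pre-combined suffixes, B peels the 4-char extension off once and then checks the three size tags on the remainder, so the combined suffixes and their byte-counting disappear.
import Mathlib
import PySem

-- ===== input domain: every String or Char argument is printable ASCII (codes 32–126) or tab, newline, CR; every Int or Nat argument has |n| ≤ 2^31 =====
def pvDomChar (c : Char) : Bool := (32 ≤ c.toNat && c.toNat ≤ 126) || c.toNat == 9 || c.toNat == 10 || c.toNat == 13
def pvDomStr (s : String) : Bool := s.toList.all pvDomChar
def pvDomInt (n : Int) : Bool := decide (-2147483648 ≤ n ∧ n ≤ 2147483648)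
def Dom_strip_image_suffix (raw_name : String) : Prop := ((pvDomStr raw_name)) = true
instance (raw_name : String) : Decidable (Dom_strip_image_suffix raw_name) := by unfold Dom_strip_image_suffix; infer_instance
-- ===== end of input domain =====

-- B peels the 4-char extension once and then checks the three size tags on the remainder,
-- instead of A's scan over eight pre-combined suffixes (simpler decomposition, same cost).

-- ===== PORT A =====
-- The for-loop with `break` is the first matching branch; suffix.lower() = suffix for these literals.
def strip_image_suffix (raw_name : String) : String :=
  let name := raw_name
  let name :=
    if PySem.Str.endswith (PySem.Str.lower name) "_normal.jpg" then PySem.Str.slice name none (some (-11))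
    else if PySem.Str.endswith (PySem.Str.lower name) "_normal.png" then PySem.Str.slice name none (some (-11))
    else if PySem.Str.endswith (PySem.Str.lower name) "_large.jpg" then PySem.Str.slice name none (some (-10))
    else if PySem.Str.endswith (PySem.Str.lower name) "_large.png" then PySem.Str.slice name none (some (-10))
    else if PySem.Str.endswith (PySem.Str.lower name) "_small.jpg" then PySem.Str.slice name none (some (-10))
    else if PySem.Str.endswith (PySem.Str.lower name) "_small.png" then PySem.Str.slice name none (some (-10))
    else if PySem.Str.endswith (PySem.Str.lower name) ".jpg" then PySem.Str.slice name none (some (-4))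
    else if PySem.Str.endswith (PySem.Str.lower name) ".png" then PySem.Str.slice name none (some (-4))
    else name
  PySem.Str.strip name

-- ===== PORT B =====
def strip_image_suffix_alt (raw_name : String) : String :=
  let low := PySem.Str.lower raw_name
  let name :=
    if PySem.Str.endswith low ".jpg" || PySem.Str.endswith low ".png" then
      let base := PySem.Str.slice raw_name none (some (-4))
      let lowb := PySem.Str.slice low none (some (-4))
      if PySem.Str.endswith lowb "_normal" then PySem.Str.slice base none (some (-7))
      else if PySem.Str.endswith lowb "_large" then PySem.Str.slice base none (some (-6))
      else if PySem.Str.endswith lowb "_small" then PySem.Str.slice base none (some (-6))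
      else base
    else raw_name
  PySem.Str.strip name

-- ===== PRECONDITION & SPEC =====
def Spec_strip_image_suffix (raw_name : String) (out : String) : Prop := out = strip_image_suffix_alt raw_name
instance (raw_name : String) (out : String) : Decidable (Spec_strip_image_suffix raw_name out) := by unfold Spec_strip_image_suffix; infer_instance

-- ===== CLAIM (what is proved, stated in full; the proofs are below) =====
def Claim_equal_strip_image_suffix : Prop := ∀ (raw_name : String), Dom_strip_image_suffix raw_name → Spec_strip_image_suffix raw_name (strip_image_suffix raw_name)

-- ===== LEMMAS AND PROOFS =====

/-- `s` ends with `p ++ q` iff it ends with `q` and what precedes that `q` ends with `p`. -/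
lemma endswith_split (s p q : List Char) :
    PySem.Chars.endswith s (p ++ q)
      = (PySem.Chars.endswith s q &&
         PySem.Chars.endswith (s.take (s.length - q.length)) p) := by
  rw [Bool.eq_iff_iff, Bool.and_eq_true, PySem.Chars.endswith_iff, PySem.Chars.endswith_iff,
     PySem.Chars.endswith_iff]
  constructor
  · rintro ⟨t, rfl⟩
    refine ⟨⟨t ++ p, by simp⟩, ⟨t, ?_⟩⟩
    have hlen : (t ++ (p ++ q)).length - q.length = (t ++ p).length := by simp; omega
    rw [hlen, ← List.append_assoc, List.take_left]
  · rintro ⟨⟨u, hu⟩, ⟨v, hv⟩⟩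
    have htk : s.take (s.length - q.length) = u := by
      subst hu; simp
    rw [htk] at hv
    exact ⟨v, by rw [← hu, ← hv, List.append_assoc]⟩

/-- Slicing 4 then 7 more characters off the end equals slicing 11 at once. -/
lemma slice_slice_4_7 (s : String) :
    PySem.Str.slice (PySem.Str.slice s none (some (-4))) none (some (-7))
      = PySem.Str.slice s none (some (-11)) := by
  have key : PySem.Chars.slice (PySem.Str.slice s none (some (-4))).toList none (some (-7))
      = PySem.Chars.slice s.toList none (some (-11)) := by
    rw [PySem.Str.toList_slice]
    simp only [PySem.Chars.slice_eq_listSlice]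
    rw [PySem.List.slice_to_neg_ofNat _ 4 (by omega), PySem.List.slice_to_neg_ofNat _ 7 (by omega),
       PySem.List.slice_to_neg_ofNat _ 11 (by omega)]
    rw [List.take_take, List.length_take]
    congr 1
    omega
  calc PySem.Str.slice (PySem.Str.slice s none (some (-4))) none (some (-7))
      = String.ofList (PySem.Chars.slice (PySem.Str.slice s none (some (-4))).toList none (some (-7))) := rfl
    _ = String.ofList (PySem.Chars.slice s.toList none (some (-11))) := by rw [key]
    _ = PySem.Str.slice s none (some (-11)) := rfl

/-- Slicing 4 then 6 more characters off the end equals slicing 10 at once. -/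
lemma slice_slice_4_6 (s : String) :
    PySem.Str.slice (PySem.Str.slice s none (some (-4))) none (some (-6))
      = PySem.Str.slice s none (some (-10)) := by
  have key : PySem.Chars.slice (PySem.Str.slice s none (some (-4))).toList none (some (-6))
      = PySem.Chars.slice s.toList none (some (-10)) := by
    rw [PySem.Str.toList_slice]
    simp only [PySem.Chars.slice_eq_listSlice]
    rw [PySem.List.slice_to_neg_ofNat _ 4 (by omega), PySem.List.slice_to_neg_ofNat _ 6 (by omega),
       PySem.List.slice_to_neg_ofNat _ 10 (by omega)]
    rw [List.take_take, List.length_take]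
    congr 1
    omega
  calc PySem.Str.slice (PySem.Str.slice s none (some (-4))) none (some (-6))
      = String.ofList (PySem.Chars.slice (PySem.Str.slice s none (some (-4))).toList none (some (-6))) := rfl
    _ = String.ofList (PySem.Chars.slice s.toList none (some (-10))) := by rw [key]
    _ = PySem.Str.slice s none (some (-10)) := rfl

-- ===== VERDICT (by name: the statement is the Claim_ definition above) =====
theorem strip_image_suffix_spec : Claim_equal_strip_image_suffix := by
  intro raw _
  unfold Spec_strip_image_suffix strip_image_suffix strip_image_suffix_alt
  simp only [PySem.Str.endswith, PySem.Str.toList_lower, PySem.Str.toList_slice,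
    PySem.Chars.slice_eq_listSlice]
  rw [PySem.List.slice_to_neg_ofNat (PySem.Chars.lower raw.toList) 4 (by omega)]
  set L := PySem.Chars.lower raw.toList with hLdef
  have h1 : PySem.Chars.endswith L ("_normal.jpg".toList)
      = (PySem.Chars.endswith L (".jpg".toList) &&
         PySem.Chars.endswith (L.take (L.length - 4)) ("_normal".toList)) := by
    rw [show ("_normal.jpg".toList) = "_normal".toList ++ ".jpg".toList from by decide,
       endswith_split, show ((".jpg".toList).length) = 4 from by decide]
  have h2 : PySem.Chars.endswith L ("_normal.png".toList)
      = (PySem.Chars.endswith L (".png".toList) &&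
         PySem.Chars.endswith (L.take (L.length - 4)) ("_normal".toList)) := by
    rw [show ("_normal.png".toList) = "_normal".toList ++ ".png".toList from by decide,
       endswith_split, show ((".png".toList).length) = 4 from by decide]
  have h3 : PySem.Chars.endswith L ("_large.jpg".toList)
      = (PySem.Chars.endswith L (".jpg".toList) &&
         PySem.Chars.endswith (L.take (L.length - 4)) ("_large".toList)) := by
    rw [show ("_large.jpg".toList) = "_large".toList ++ ".jpg".toList from by decide,
       endswith_split, show ((".jpg".toList).length) = 4 from by decide]
  have h4 : PySem.Chars.endswith L ("_large.png".toList)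
      = (PySem.Chars.endswith L (".png".toList) &&
         PySem.Chars.endswith (L.take (L.length - 4)) ("_large".toList)) := by
    rw [show ("_large.png".toList) = "_large".toList ++ ".png".toList from by decide,
       endswith_split, show ((".png".toList).length) = 4 from by decide]
  have h5 : PySem.Chars.endswith L ("_small.jpg".toList)
      = (PySem.Chars.endswith L (".jpg".toList) &&
         PySem.Chars.endswith (L.take (L.length - 4)) ("_small".toList)) := by
    rw [show ("_small.jpg".toList) = "_small".toList ++ ".jpg".toList from by decide,
       endswith_split, show ((".jpg".toList).length) = 4 from by decide]
  have h6 : PySem.Chars.endswith L ("_small.png".toList)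
      = (PySem.Chars.endswith L (".png".toList) &&
         PySem.Chars.endswith (L.take (L.length - 4)) ("_small".toList)) := by
    rw [show ("_small.png".toList) = "_small".toList ++ ".png".toList from by decide,
       endswith_split, show ((".png".toList).length) = 4 from by decide]
  rw [h1, h2, h3, h4, h5, h6]
  cases hjpg : PySem.Chars.endswith L (".jpg".toList) <;>
    cases hpng : PySem.Chars.endswith L (".png".toList) <;>
    cases hn : PySem.Chars.endswith (L.take (L.length - 4)) ("_normal".toList) <;>
    cases hl : PySem.Chars.endswith (L.take (L.length - 4)) ("_large".toList) <;>
    cases hsm : PySem.Chars.endswith (L.take (L.length - 4)) ("_small".toList) <;>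
    simp [slice_slice_4_7, slice_slice_4_6]
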